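-- pv_equiv track=rewrite | github.com/Grifff17/AdventOfCode2023-Day14 | solution.py | slideRotate
-- ===== SOURCE A (Python) =====
-- def slideRotate(platform):
--     newPlatform = platform.copy()
--     newPlatform = rotate(newPlatform)
--
--     for i in range(len(newPlatform)):
--         for j in reversed(range(len(newPlatform[0]))):
--             if newPlatform[i][j] == "O":
--                 newPlatform[i][j] = "."
--                 for k in range(j,len(newPlatform[0])+1):
--                     if k == len(newPlatform[0]) or newPlatform[i][k] != ".":
--                         newPlatform[i][k-1] = "O"
--                         break
--
--     return newPlatform
--
-- def rotate(platform):
--     output = list(zip(*platform[::-1]))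
--     output = [ list(row) for row in output ]
--     return output
-- ===== SOURCE B (Python) =====
-- def slideRotate(platform):
--     rotated = [list(row) for row in zip(*platform[::-1])]
--     out = []
--     for row in rotated:
--         new = []
--         dots = 0
--         rocks = 0
--         for c in row:
--             if c == '.':
--                 dots += 1
--             elif c == 'O':
--                 rocks += 1
--             else:
--                 if dots or rocks:
--                     new += ['.'] * dots + ['O'] * rocks
--                     dots = 0
--                     rocks = 0
--                 new.append(c)
--         if dots or rocks:
--             new += ['.'] * dots + ['O'] * rocks
--         out.append(new)
--     return out
-- ===== Notes on version B (the rewrite author's own statement) =====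
-- stated objective: alternative
-- what changed: Replaced A's per-rock inner rightward scan over an index-mutated row by a single left-to-right pass per rotated row that counts dots and rocks of the current blocker-delimited segment and emits '.'*dots + 'O'*rocks at each blocker and at the end.
import Mathlib
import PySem

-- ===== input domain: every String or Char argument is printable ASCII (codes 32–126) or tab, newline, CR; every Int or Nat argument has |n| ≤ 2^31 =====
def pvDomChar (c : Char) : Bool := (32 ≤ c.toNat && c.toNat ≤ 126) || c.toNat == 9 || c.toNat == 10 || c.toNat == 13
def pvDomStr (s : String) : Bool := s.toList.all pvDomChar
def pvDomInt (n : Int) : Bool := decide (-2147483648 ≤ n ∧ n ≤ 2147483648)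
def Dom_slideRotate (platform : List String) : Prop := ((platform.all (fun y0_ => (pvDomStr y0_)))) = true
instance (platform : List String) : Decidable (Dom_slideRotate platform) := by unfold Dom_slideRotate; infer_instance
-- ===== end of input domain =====

-- B: instead of A's per-rock rightward settle scans over a mutated row, rebuild each
-- rotated row in one left-to-right pass counting dots and rocks per blocker-delimited
-- segment (objective: alternative — a different algorithm, not claimed faster).

-- ===== PORT A =====
-- rotate(platform): list(zip(*platform[::-1])), rows as lists of chars (shared by both
-- ports because both Pythons contain this identical rotation expression)
def rotateZip (rows : List (List Char)) : List (List Char) :=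
  if h : rows = [] then []
  else if h2 : rows.all (fun r => !r.isEmpty) then
    rows.map (fun r => r.headD ' ') :: rotateZip (rows.map (fun r => r.tail))
  else []
termination_by (rows.headD []).length
decreasing_by
  cases rows with
  | nil => exact absurd rfl h
  | cons r rs =>
    simp only [List.all_cons, Bool.and_eq_true, Bool.not_eq_true'] at h2
    have hr : r ≠ [] := by
      intro he; subst he; simp at h2
    have hp : 0 < r.length := List.length_pos_iff.mpr hr
    simp only [List.attach_cons, List.map_cons, List.headD_cons, List.length_tail]
    omega

def rotateG (platform : List String) : List (List Char) :=
  rotateZip (platform.reverse.map String.toList)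

-- inner k-loop of A: scan right from k while cells are '.', place 'O' just before the stop
def settleFuel : Nat → List Char → Nat → List Char
  | 0, row, _ => row           -- fuel never runs out on A's calls
  | fuel + 1, row, k =>
    if k = row.length ∨ row.getD k ' ' ≠ '.' then row.set (k - 1) 'O'
    else settleFuel fuel row (k + 1)

-- j-loop of A: j from n-1 down to 0 over one (mutated) row
def rollAGo : List Char → Nat → List Char
  | row, 0 => row
  | row, m + 1 =>
    let row' :=
      if row.getD m ' ' = 'O' then settleFuel (row.length + 1 - m) (row.set m '.') m
      else row
    rollAGo row' m

def rollA (row : List Char) : List Char := rollAGo row row.length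

def slideRotate (platform : List String) : List (List String) :=
  ((rotateG platform).map rollA).map (fun row => row.map (fun c => String.mk [c]))

-- ===== PORT B =====
-- one pass per row, counting '.' and 'O' of the current segment, flushing at each blocker
def rollBGo : List Char → Nat → Nat → List Char
  | [], dots, rocks =>
    if dots ≠ 0 ∨ rocks ≠ 0 then List.replicate dots '.' ++ List.replicate rocks 'O' else []
  | c :: rest, dots, rocks =>
    if c = '.' then rollBGo rest (dots + 1) rocks
    else if c = 'O' then rollBGo rest dots (rocks + 1)
    else if dots ≠ 0 ∨ rocks ≠ 0 then
      List.replicate dots '.' ++ List.replicate rocks 'O' ++ c :: rollBGo rest 0 0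
    else c :: rollBGo rest 0 0

def rollB (row : List Char) : List Char := rollBGo row 0 0

def slideRotate_alt (platform : List String) : List (List String) :=
  ((rotateG platform).map rollB).map (fun row => row.map (fun c => String.mk [c]))

-- ===== PRECONDITION & SPEC =====
def Spec_slideRotate (platform : List String) (out : List (List String)) : Prop := out = slideRotate_alt platform
instance (platform : List String) (out : List (List String)) : Decidable (Spec_slideRotate platform out) := by unfold Spec_slideRotate; infer_instance

-- ===== CLAIM (what is proved, stated in full; the proofs are below) =====
def Claim_equal_slideRotate : Prop := ∀ (platform : List String), Dom_slideRotate platform → Spec_slideRotate platform (slideRotate platform)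

-- ===== LEMMAS AND PROOFS =====

-- functional spec of rolling one row to the right: foldr with 'O' tunnelling through dots
def pushO : List Char → List Char
  | '.' :: rest => '.' :: pushO rest
  | t => 'O' :: t

def stepF (c : Char) (t : List Char) : List Char :=
  if c = 'O' then pushO t else c :: t

theorem pushO_cons_dot (t : List Char) : pushO ('.' :: t) = '.' :: pushO t := rfl

theorem pushO_not_dot (t : List Char) (h : t.headD 'x' ≠ '.' ∨ t = []) :
    pushO t = 'O' :: t := by
  match t, h with
  | [], _ => rfl
  | c :: u, h =>
    rcases h with h | h
    · simp only [List.headD_cons] at h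
      unfold pushO
      split
      · rename_i heq; cases heq; exact absurd rfl h
      · rfl
    · exact absurd h (by simp)

theorem pushO_iter_cons_dot (r : Nat) (t : List Char) :
    pushO^[r] ('.' :: t) = '.' :: pushO^[r] t := by
  induction r generalizing t with
  | zero => rfl
  | succ r ih => rw [Function.iterate_succ_apply, pushO_cons_dot, Function.iterate_succ_apply, ih]

theorem pushO_iter_block (r : Nat) (t : List Char) (h : t.headD 'x' ≠ '.' ∨ t = []) :
    pushO^[r] t = List.replicate r 'O' ++ t := by
  induction r with
  | zero => rfl
  | succ r ih =>
    rw [Function.iterate_succ_apply', ih]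
    cases r with
    | zero => simpa using pushO_not_dot t h
    | succ r =>
      have : ((List.replicate (r+1+1) 'O' ++ t) : List Char) = 'O' :: (List.replicate (r+1) 'O' ++ t) := by
        simp [List.replicate_succ]
      rw [this]
      rw [show (List.replicate (r+1) 'O' ++ t : List Char) = 'O' :: (List.replicate r 'O' ++ t) by simp [List.replicate_succ]]
      rfl

-- the 'if dots or rocks' fast path flushes nothing, so it equals the unguarded flush
theorem flush_guard (dots rocks : Nat) (x : List Char) :
    (if dots ≠ 0 ∨ rocks ≠ 0 then List.replicate dots '.' ++ List.replicate rocks 'O' ++ x else x)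
      = List.replicate dots '.' ++ List.replicate rocks 'O' ++ x := by
  split
  · rfl
  · rename_i h
    push_neg at h
    simp [h.1, h.2]

-- B equals the foldr spec
theorem rollBGo_eq (rest : List Char) (dots rocks : Nat) :
    rollBGo rest dots rocks =
      List.replicate dots '.' ++ pushO^[rocks] (List.foldr stepF [] rest) := by
  induction rest generalizing dots rocks with
  | nil =>
    rw [show rollBGo [] dots rocks
          = (if dots ≠ 0 ∨ rocks ≠ 0 then List.replicate dots '.' ++ List.replicate rocks 'O' ++ ([] : List Char) else []) from by
      simp [rollBGo]]
    rw [flush_guard]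
    simp [pushO_iter_block rocks [] (Or.inr rfl)]
  | cons c u ih =>
    by_cases hd : c = '.'
    · subst hd
      rw [show rollBGo ('.' :: u) dots rocks = rollBGo u (dots + 1) rocks from by
        simp [rollBGo]]
      rw [ih, List.foldr_cons]
      rw [show stepF '.' (List.foldr stepF [] u) = '.' :: List.foldr stepF [] u from rfl]
      rw [pushO_iter_cons_dot]
      simp [List.replicate_succ', List.append_assoc]
    · by_cases ho : c = 'O'
      · subst ho
        rw [show rollBGo ('O' :: u) dots rocks = rollBGo u dots (rocks + 1) from by
          simp [rollBGo]]
        rw [ih, List.foldr_cons]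
        rw [show stepF 'O' (List.foldr stepF [] u) = pushO (List.foldr stepF [] u) from rfl]
        rw [← Function.iterate_succ_apply]
      · rw [show rollBGo (c :: u) dots rocks =
            List.replicate dots '.' ++ List.replicate rocks 'O' ++ c :: rollBGo u 0 0 from by
          rw [show rollBGo (c :: u) dots rocks
                = (if dots ≠ 0 ∨ rocks ≠ 0 then
                    List.replicate dots '.' ++ List.replicate rocks 'O' ++ c :: rollBGo u 0 0
                  else c :: rollBGo u 0 0) from by simp [rollBGo, hd, ho]]
          rw [flush_guard]]
        rw [ih, List.foldr_cons]
        rw [show stepF c (List.foldr stepF [] u) = c :: List.foldr stepF [] u from by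
          simp [stepF, ho]]
        rw [pushO_iter_block rocks (c :: List.foldr stepF [] u) (Or.inl (by simpa using hd))]
        simp [List.append_assoc]

theorem rollB_eq_spec (row : List Char) : rollB row = List.foldr stepF [] row := by
  simpa using rollBGo_eq row 0 0

-- list surgery helpers for A's index-based mutation
theorem getD_append_len (l t : List Char) (c d : Char) :
    (l ++ c :: t).getD l.length d = c := by
  induction l with
  | nil => rfl
  | cons a l ih => simpa using ih

theorem set_append_len (l t : List Char) (c x : Char) :
    (l ++ c :: t).set l.length x = l ++ x :: t := by
  induction l with
  | nil => rfl
  | cons a l ih => simpa using ih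

-- A's settle scan equals pushO
theorem settleFuel_eq (t : List Char) (l : List Char) (fuel : Nat)
    (h : fuel ≥ t.length + 2) :
    settleFuel fuel (l ++ '.' :: t) l.length = l ++ pushO t := by
  induction t generalizing l fuel with
  | nil =>
    match fuel, h with
    | f + 2, _ =>
      rw [show settleFuel (f + 2) (l ++ ['.']) l.length
            = settleFuel (f + 1) (l ++ ['.']) (l.length + 1) from by
        simp [settleFuel, getD_append_len]]
      rw [show settleFuel (f + 1) (l ++ ['.']) (l.length + 1)
            = (l ++ ['.']).set (l.length + 1 - 1) 'O' from by
        simp [settleFuel]]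
      simp only [Nat.add_sub_cancel, set_append_len]
      rfl
  | cons b u ih =>
    match fuel, h with
    | f + 2, h =>
      rw [show settleFuel (f + 2) (l ++ '.' :: b :: u) l.length
            = settleFuel (f + 1) (l ++ '.' :: b :: u) (l.length + 1) from by
        simp [settleFuel, getD_append_len]]
      by_cases hb : b = '.'
      · subst hb
        have h1 : (l ++ '.' :: '.' :: u) = ((l ++ ['.']) ++ '.' :: u) := by simp
        have h2 : l.length + 1 = (l ++ ['.']).length := by simp
        rw [h1, h2, ih (l ++ ['.']) (f + 1) (by simp at h ⊢; omega)]
        simp [pushO_cons_dot]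
      · rw [show settleFuel (f + 1) (l ++ '.' :: b :: u) (l.length + 1)
              = (l ++ '.' :: b :: u).set (l.length + 1 - 1) 'O' from by
          have hg : (l ++ '.' :: b :: u).getD (l.length + 1) ' ' = b := by
            have : (l ++ '.' :: b :: u) = ((l ++ ['.']) ++ b :: u) := by simp
            rw [this, show l.length + 1 = (l ++ ['.']).length by simp, getD_append_len]
          cases f with
          | zero => simp [settleFuel, hg, hb]
          | succ f => simp [settleFuel, hg, hb]]
        simp only [Nat.add_sub_cancel, set_append_len]
        rw [pushO_not_dot (b :: u) (Or.inl (by simpa using hb))]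

-- A equals the foldr spec
theorem rollAGo_eq (l t : List Char) :
    rollAGo (l ++ t) l.length = List.foldr stepF t l := by
  induction l using List.reverseRecOn generalizing t with
  | nil => rfl
  | append_singleton l' c ih =>
    have hrow : (l' ++ [c]) ++ t = l' ++ c :: t := by simp
    have hlen : (l' ++ [c]).length = l'.length + 1 := by simp
    rw [hrow, hlen]
    rw [show rollAGo (l' ++ c :: t) (l'.length + 1)
          = rollAGo (if (l' ++ c :: t).getD l'.length ' ' = 'O' then
              settleFuel ((l' ++ c :: t).length + 1 - l'.length) ((l' ++ c :: t).set l'.length '.') l'.length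
            else (l' ++ c :: t)) l'.length from rfl]
    rw [getD_append_len]
    rw [List.foldr_append]
    by_cases hc : c = 'O'
    · subst hc
      rw [if_pos rfl, set_append_len]
      have hf : (l' ++ 'O' :: t).length + 1 - l'.length = t.length + 2 := by
        simp; omega
      rw [hf, settleFuel_eq t l' (t.length + 2) (le_refl _), ih]
      rfl
    · rw [if_neg hc, ih]
      have : List.foldr stepF t [c] = c :: t := by simp [stepF, hc]
      rw [this]

theorem rollA_eq_spec (row : List Char) : rollA row = List.foldr stepF [] row := by
  have := rollAGo_eq row []
  simpa [rollA] using this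

theorem rollA_eq_rollB (row : List Char) : rollA row = rollB row := by
  rw [rollA_eq_spec, rollB_eq_spec]

-- ===== VERDICT (by name: the statement is the Claim_ definition above) =====
theorem slideRotate_spec : Claim_equal_slideRotate := by
  intro platform _
  unfold Spec_slideRotate slideRotate slideRotate_alt
  simp [rollA_eq_rollB]
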